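-- pv_equiv track=rewrite | github.com/scyberboy/adventofcode_2023 | tasks/day_01.py | translate_from_right
-- ===== SOURCE A (Python) =====
-- def translate_from_right(elem: str, wordy_digits, str_digits):
--     match_indexes = []
--     for idx in range(len(wordy_digits)):
--         if wordy_digits[idx] in elem:
--             match_indexes.append(elem.rindex(wordy_digits[idx]))
--         else:
--             match_indexes.append(-1)
--
--     index_in_elem = max(match_indexes)
--     index_in_digits = match_indexes.index(index_in_elem)
--
--     # be careful here, to really translate the right most occurrence ;)
--     new_elem = elem[:index_in_elem] \
--                + elem[index_in_elem:].replace(wordy_digits[index_in_digits], str_digits[index_in_digits], 1)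
--
--     return new_elem
-- ===== SOURCE B (Python) =====
-- def translate_from_right(elem, wordy_digits, str_digits):
--     # single right-to-left scan: first matching position is A's max(rindex),
--     # first matching word in list order is A's tie-break
--     for i in range(len(elem), -1, -1):
--         for j, word in enumerate(wordy_digits):
--             if elem.startswith(word, i):
--                 return elem[:i] + str_digits[j] + elem[i + len(word):]
--     return elem
-- ===== Notes on version B (the rewrite author's own statement) =====
-- stated objective: faster
-- what changed: Instead of computing every word's rightmost index over the whole string, taking max and re-finding its list position and then slicing+replace, B does one right-to-left scan over positions and returns at the first (position, word) match, so it stops as soon as the rightmost occurrence is found.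
import Mathlib
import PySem

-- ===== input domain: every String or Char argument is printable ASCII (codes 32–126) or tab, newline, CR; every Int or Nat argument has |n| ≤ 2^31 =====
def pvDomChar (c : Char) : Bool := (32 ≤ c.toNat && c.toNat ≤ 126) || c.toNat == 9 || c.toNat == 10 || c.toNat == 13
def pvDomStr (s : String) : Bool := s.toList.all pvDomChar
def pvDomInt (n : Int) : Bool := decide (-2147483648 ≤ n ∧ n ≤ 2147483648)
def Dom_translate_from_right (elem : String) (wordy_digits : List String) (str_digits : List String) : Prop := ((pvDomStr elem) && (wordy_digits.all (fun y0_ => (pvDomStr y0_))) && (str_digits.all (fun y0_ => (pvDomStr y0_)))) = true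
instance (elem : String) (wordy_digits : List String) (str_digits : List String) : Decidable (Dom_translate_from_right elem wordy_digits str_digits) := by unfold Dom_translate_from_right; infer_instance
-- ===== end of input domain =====

-- B replaces A's rindex-max-index-replace pipeline by a single right-to-left scan that stops at the rightmost match (measured faster).


-- ===== PORT A =====
-- s.replace(old, new, 1): PySem.Chars.replace has no count, so the count=1 form is ported
-- by hand via the index of the first occurrence (exact, including old = "")
def pvReplace1 (s old new : List Char) : List Char :=
  let f := PySem.Chars.find s old
  if f = -1 then s else s.take f.toNat ++ new ++ s.drop (f.toNat + old.length)

def translate_from_right (elem : String) (wordy_digits : List String) (str_digits : List String) : String :=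
  -- inside the 'w in elem' guard, elem.rindex(w) = elem.rfind(w)
  let match_indexes : List Int := wordy_digits.foldl
    (fun acc w => if PySem.Chars.isIn w.toList elem.toList
                  then acc ++ [PySem.Chars.rfind elem.toList w.toList]
                  else acc ++ [(-1 : Int)]) []
  -- max() raises ValueError on []: wordy_digits = [] is outside Pre_
  let index_in_elem : Int := (PySem.List.max? match_indexes (fun x => x)).getD (-1)
  let index_in_digits : Nat := (PySem.List.index? match_indexes index_in_elem).getD 0
  let w := (wordy_digits.getD index_in_digits "").toList   -- in range (index_in_digits < len wordy_digits)
  let d := (str_digits.getD index_in_digits "").toList     -- in range inside Pre_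
  String.ofList (PySem.List.slice elem.toList none (some index_in_elem)
             ++ pvReplace1 (PySem.List.slice elem.toList (some index_in_elem) none) w d)

-- ===== PORT B =====
-- inner loop of Source B: first j with elem.startswith(wordy_digits[j], i);
-- elem.startswith(w, i) for 0 ≤ i ≤ len(elem) is exactly: w is a prefix of elem[i:]
def pvRow (e : List Char) (i : Nat) : List String → Option Nat
  | [] => none
  | w :: ws => if PySem.Chars.startswith (e.drop i) w.toList then some 0
               else (pvRow e i ws).map (· + 1)

-- outer loop of Source B: i from n down to 0, stop at the first position with a match
def pvScan (e : List Char) (wd : List String) : Nat → Option (Nat × Nat)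
  | 0 => (pvRow e 0 wd).map (fun j => (0, j))
  | i + 1 => match pvRow e (i + 1) wd with
             | some j => some (i + 1, j)
             | none => pvScan e wd i

def translate_from_right_alt (elem : String) (wordy_digits : List String) (str_digits : List String) : String :=
  match pvScan elem.toList wordy_digits elem.toList.length with
  | some (i, j) =>
      String.ofList (elem.toList.take i ++ (str_digits.getD j "").toList
                 ++ elem.toList.drop (i + (wordy_digits.getD j "").toList.length))
  | none => elem

-- ===== PRECONDITION & SPEC =====
-- closed-form input conditions used by Pre_: "no word of wd occurs in e", and
-- "(i, j) is the occurrence A picks: word j matches at i, no word matches further right,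
-- and no earlier-listed word matches at i"
def pvNoMatchB (e : List Char) (wd : List String) : Bool :=
  (List.range (e.length + 1)).all (fun i => wd.all (fun w => !(w.toList.isPrefixOf (e.drop i))))
def pvWinsB (e : List Char) (wd : List String) (i j : Nat) : Bool :=
  (wd.getD j "").toList.isPrefixOf (e.drop i) &&
  (List.range (e.length + 1)).all (fun i' =>
    !(decide (i < i')) || wd.all (fun w => !(w.toList.isPrefixOf (e.drop i')))) &&
  (List.range j).all (fun j' => !((wd.getD j' "").toList.isPrefixOf (e.drop i)))

-- Pre_ is exactly the inputs on which A returns normally: wordy_digits nonempty (else max()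
-- raises ValueError) and the index A selects -- the first word achieving the rightmost match,
-- or 0 when no word matches -- inside str_digits (else IndexError).
def Pre_translate_from_right (elem : String) (wordy_digits : List String) (str_digits : List String) : Prop :=
  wordy_digits ≠ [] ∧
  (pvNoMatchB elem.toList wordy_digits = true → 0 < str_digits.length) ∧
  (∀ i ≤ elem.toList.length, ∀ j < wordy_digits.length,
      pvWinsB elem.toList wordy_digits i j = true → j < str_digits.length)
instance (elem : String) (wordy_digits : List String) (str_digits : List String) : Decidable (Pre_translate_from_right elem wordy_digits str_digits) := by unfold Pre_translate_from_right; infer_instance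

def pvWitness_translate_from_right : String × List String × List String :=
  ("zoneight", ["one", "eight"], ["1", "8"])

def Spec_translate_from_right (elem : String) (wordy_digits : List String) (str_digits : List String) (out : String) : Prop := out = translate_from_right_alt elem wordy_digits str_digits
instance (elem : String) (wordy_digits : List String) (str_digits : List String) (out : String) : Decidable (Spec_translate_from_right elem wordy_digits str_digits out) := by unfold Spec_translate_from_right; infer_instance

-- ===== CLAIM (what is proved, stated in full; the proofs are below) =====
def Claim_equal_translate_from_right : Prop := ∀ (elem : String) (wordy_digits : List String) (str_digits : List String), Dom_translate_from_right elem wordy_digits str_digits → Pre_translate_from_right elem wordy_digits str_digits → Spec_translate_from_right elem wordy_digits str_digits (translate_from_right elem wordy_digits str_digits)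

-- ===== LEMMAS AND PROOFS =====

-- bounded-existence of a match position
theorem pv_exists_bound (e w : List Char) :
    (∃ i, w <+: e.drop i) ↔ (∃ i ≤ e.length, w <+: e.drop i) := by
  constructor
  · rintro ⟨i, hi⟩
    by_cases h : i ≤ e.length
    · exact ⟨i, h, hi⟩
    · refine ⟨e.length, le_rfl, ?_⟩
      rw [List.drop_length]
      rw [List.drop_eq_nil_iff.mpr (by omega)] at hi
      exact hi
  · rintro ⟨i, _, hi⟩; exact ⟨i, hi⟩

theorem pv_isIn_iff (e w : List Char) :
    PySem.Chars.isIn w e = true ↔ ∃ i ≤ e.length, w <+: e.drop i := by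
  rw [← PySem.Chars.exists_prefix_drop_iff_isIn, pv_exists_bound]

theorem pv_infix_iff (s w : List Char) :
    w <:+: s ↔ ∃ i, w <+: s.drop i := by
  rw [pv_exists_bound, ← pv_isIn_iff, PySem.Chars.isIn_iff_infix]

theorem pv_go_spec (e w : List Char) (n i : Nat) (hi : i ≤ n) (hp : w <+: e.drop i)
    (hmax : ∀ i', i < i' → i' ≤ n → ¬ w <+: e.drop i') :
    PySem.Chars.rfind.go e w n = (i : Int) := by
  induction n with
  | zero =>
      have : i = 0 := by omega
      subst this
      simp only [PySem.Chars.rfind.go]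
      rw [if_pos]; · rfl
      · simpa [List.isPrefixOf_iff_prefix] using hp
  | succ j ih =>
      by_cases hij : i = j + 1
      · subst hij
        simp only [PySem.Chars.rfind.go]
        rw [if_pos]; simpa [List.isPrefixOf_iff_prefix] using hp
      · have hij' : i ≤ j := by omega
        simp only [PySem.Chars.rfind.go]
        rw [if_neg]
        · exact ih hij' (fun i' h1 h2 => hmax i' h1 (by omega))
        · simp only [List.isPrefixOf_iff_prefix]
          simpa using hmax (j+1) (by omega) le_rfl

theorem pv_rfind_spec (e w : List Char) (h : ∃ i ≤ e.length, w <+: e.drop i) :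
    ∃ i ≤ e.length, PySem.Chars.rfind e w = (i : Int) ∧ w <+: e.drop i ∧
      ∀ i', i < i' → i' ≤ e.length → ¬ w <+: e.drop i' := by
  classical
  obtain ⟨i0, hi0, hp0⟩ := h
  set P : Nat → Prop := fun i => w <+: e.drop i with hP
  have hg : P (Nat.findGreatest P e.length) := Nat.findGreatest_spec hi0 hp0
  refine ⟨Nat.findGreatest P e.length, Nat.findGreatest_le _, ?_, hg, ?_⟩
  · exact pv_go_spec e w e.length _ (Nat.findGreatest_le _) hg
      (fun i' h1 h2 => Nat.findGreatest_is_greatest h1 h2)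
  · exact fun i' h1 h2 => Nat.findGreatest_is_greatest h1 h2
theorem pvRow_eq_none_iff (e : List Char) (i : Nat) (wd : List String) :
    pvRow e i wd = none ↔ ∀ w ∈ wd, ¬ w.toList <+: e.drop i := by
  induction wd with
  | nil => simp [pvRow]
  | cons w ws ih =>
      simp only [pvRow]
      by_cases h : PySem.Chars.startswith (e.drop i) w.toList = true
      · rw [if_pos h]
        rw [PySem.Chars.startswith_iff] at h
        simp [h]
      · rw [if_neg h]
        have h' : ¬ w.toList <+: e.drop i := fun hc => h ((PySem.Chars.startswith_iff _ _).mpr hc)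
        simp only [Option.map_eq_none_iff, ih]
        constructor
        · intro hall w' hw'
          rw [List.mem_cons] at hw'
          rcases hw' with rfl | hw'
          · exact h'
          · exact hall w' hw'
        · intro hall w' hw'
          exact hall w' (by simp [hw'])

theorem pvRow_eq_some (e : List Char) (i : Nat) (wd : List String) (j : Nat)
    (h : pvRow e i wd = some j) :
    j < wd.length ∧ (wd.getD j "").toList <+: e.drop i ∧
      ∀ j' < j, ¬ (wd.getD j' "").toList <+: e.drop i := by
  induction wd generalizing j with
  | nil => simp [pvRow] at h
  | cons w ws ih =>
      simp only [pvRow] at h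
      by_cases hs : PySem.Chars.startswith (e.drop i) w.toList = true
      · rw [if_pos hs] at h
        obtain rfl : j = 0 := by simpa using h.symm
        refine ⟨by simp, by simpa using (PySem.Chars.startswith_iff _ _).mp hs, by omega⟩
      · rw [if_neg hs] at h
        obtain ⟨j0, hj0, rfl⟩ := Option.map_eq_some_iff.mp h
        obtain ⟨h1, h2, h3⟩ := ih j0 hj0
        refine ⟨by simpa using h1, by simpa using h2, ?_⟩
        intro j' hj'
        cases j' with
        | zero =>
            intro hc
            exact hs ((PySem.Chars.startswith_iff _ _).mpr (by simpa using hc))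
        | succ j'' => simpa using h3 j'' (by omega)

theorem pvScan_eq_none_iff (e : List Char) (wd : List String) (n : Nat) :
    pvScan e wd n = none ↔ ∀ i ≤ n, pvRow e i wd = none := by
  induction n with
  | zero => simp [pvScan, Nat.le_zero]
  | succ m ih =>
      simp only [pvScan]
      cases hr : pvRow e (m+1) wd with
      | some j => simp only []
                  constructor
                  · intro h; cases h
                  · intro h; exact absurd (h (m+1) le_rfl) (by simp [hr])
      | none =>
          simp only []
          rw [ih]
          constructor
          · intro h i hi
            rcases Nat.lt_or_ge i (m+1) with h'|h'
            · exact h i (by omega)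
            · have : i = m + 1 := by omega
              subst this; exact hr
          · intro h i hi; exact h i (by omega)

theorem pvScan_spec (e : List Char) (wd : List String) (n i : Nat) (j : Nat)
    (hi : i ≤ n) (hrow : pvRow e i wd = some j)
    (hmax : ∀ i', i < i' → i' ≤ n → pvRow e i' wd = none) :
    pvScan e wd n = some (i, j) := by
  induction n with
  | zero =>
      obtain rfl : i = 0 := by omega
      simp [pvScan, hrow]
  | succ m ih =>
      by_cases hin : i = m + 1
      · subst hin; simp [pvScan, hrow]
      · have h1 : pvRow e (m+1) wd = none := hmax (m+1) (by omega) le_rfl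
        simp only [pvScan, h1]
        exact ih (by omega) (fun i' ha hb => hmax i' ha (by omega))

theorem pv_find_of_prefix (s w : List Char) (h : w <+: s) : PySem.Chars.find s w = 0 := by
  have hinf : w <:+: s := h.isInfix
  have h0 : 0 ≤ PySem.Chars.find s w := (PySem.Chars.find_nonneg_iff _ _).mpr hinf
  have hsp := PySem.Chars.find_spec (s := s) (sub := w) h0
  by_contra hne
  have hpos : 0 < (PySem.Chars.find s w).toNat := by omega
  exact hsp.2 0 hpos (by simpa using h)

def pvMI (e : List Char) (wd : List String) : List Int :=
  wd.map (fun w => if PySem.Chars.isIn w.toList e then PySem.Chars.rfind e w.toList else -1)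

theorem pv_foldl_mi (e : List Char) (wd : List String) (acc : List Int) :
    wd.foldl (fun acc w => if PySem.Chars.isIn w.toList e
                  then acc ++ [PySem.Chars.rfind e w.toList]
                  else acc ++ [(-1 : Int)]) acc = acc ++ pvMI e wd := by
  induction wd generalizing acc with
  | nil => simp [pvMI]
  | cons w ws ih =>
      simp only [List.foldl_cons, pvMI, List.map_cons]
      by_cases h : PySem.Chars.isIn w.toList e = true
      · rw [if_pos h, ih, if_pos h]; simp [pvMI]
      · rw [if_neg h, ih, if_neg h]; simp [pvMI]

theorem pvMI_getD (e : List Char) (wd : List String) (j : Nat) (hj : j < wd.length) :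
    (pvMI e wd).getD j 0 =
      (if PySem.Chars.isIn (wd.getD j "").toList e then PySem.Chars.rfind e (wd.getD j "").toList else -1) := by
  simp [pvMI, List.getD_eq_getElem?_getD, List.getElem?_map, List.getElem?_eq_getElem hj,
        List.getD_eq_getElem _ _ hj]

theorem pvMI_length (e : List Char) (wd : List String) : (pvMI e wd).length = wd.length := by
  simp [pvMI]

theorem pv_getD_mem {α : Type} [Inhabited α] (l : List α) (j : Nat) (d : α) (hj : j < l.length) :
    l.getD j d ∈ l := by
  rw [List.getD_eq_getElem _ _ hj]; exact List.getElem_mem hj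

theorem pv_index?_eq (l : List Int) (v : Int) (j : Nat) (hj : j < l.length)
    (hv : l.getD j 0 = v) (hlt : ∀ j' < j, l.getD j' 0 ≠ v) :
    PySem.List.index? l v = some j := by
  induction l generalizing j with
  | nil => simp at hj
  | cons x xs ih =>
      cases j with
      | zero =>
          simp only [List.getD_cons_zero] at hv
          subst hv
          exact PySem.List.index?_cons_self _ _
      | succ j0 =>
          have hx : x ≠ v := by simpa using hlt 0 (by omega)
          rw [PySem.List.index?_cons_of_ne xs hx]
          rw [ih j0 (by simpa using hj) (by simpa using hv)
              (fun j' hj' => by simpa using hlt (j'+1) (by omega))]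
          rfl

-- ===== VERDICT (by name: the statement is the Claim_ definition above) =====
theorem translate_from_right_spec : Claim_equal_translate_from_right := by
  intro elem wd sd _ hpre
  obtain ⟨hne, -, -⟩ := hpre
  unfold Spec_translate_from_right
  by_cases hm : ∃ i ≤ elem.toList.length, ∃ w ∈ wd, w.toList <+: elem.toList.drop i
  · obtain ⟨i0, hi0, hw0⟩ := hm
    set e := elem.toList with he
    have hR0 : pvRow e i0 wd ≠ none := by
      intro h
      obtain ⟨w, hwmem, hp⟩ := hw0
      exact (pvRow_eq_none_iff e i0 wd).mp h w hwmem hp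
    set istar := Nat.findGreatest (fun i => pvRow e i wd ≠ none) e.length with hist
    have hRi : pvRow e istar wd ≠ none :=
      Nat.findGreatest_spec (P := fun i => pvRow e i wd ≠ none) hi0 hR0
    obtain ⟨jstar, hrow⟩ := Option.ne_none_iff_exists'.mp hRi
    have hmaxR : ∀ i', istar < i' → i' ≤ e.length → pvRow e i' wd = none := by
      intro i' h1 h2
      by_contra hcon
      have := Nat.le_findGreatest (P := fun i => pvRow e i wd ≠ none) h2 hcon
      omega
    obtain ⟨hjlt, hpre_j, hminj⟩ := pvRow_eq_some e istar wd jstar hrow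
    have histar_le : istar ≤ e.length := Nat.findGreatest_le _
    have hB : translate_from_right_alt elem wd sd
        = String.ofList (e.take istar ++ (sd.getD jstar "").toList
            ++ e.drop (istar + (wd.getD jstar "").toList.length)) := by
      unfold translate_from_right_alt
      rw [← he, pvScan_spec e wd e.length istar jstar histar_le hrow hmaxR]
    have hIn : PySem.Chars.isIn (wd.getD jstar "").toList e = true :=
      (pv_isIn_iff e _).mpr ⟨istar, histar_le, hpre_j⟩
    have hmatch_le : ∀ i ≤ e.length, ∀ w ∈ wd, w.toList <+: e.drop i → i ≤ istar := by
      intro i hi w hwmem hp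
      by_contra hcon
      exact (pvRow_eq_none_iff e i wd).mp (hmaxR i (by omega) hi) w hwmem hp
    have hrfind_j : PySem.Chars.rfind e (wd.getD jstar "").toList = (istar : Int) := by
      obtain ⟨r, hrle, heq, hp, hmax⟩ := pv_rfind_spec e _ ((pv_isIn_iff e _).mp hIn)
      have h1 : r ≤ istar := hmatch_le r hrle _ (pv_getD_mem wd jstar "" hjlt) hp
      have h2 : istar ≤ r := by
        by_contra hc
        exact hmax istar (by omega) histar_le hpre_j
      have : r = istar := by omega
      rw [← this]; exact heq
    have hmi_j : (pvMI e wd).getD jstar 0 = (istar : Int) := by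
      rw [pvMI_getD e wd jstar hjlt, if_pos hIn, hrfind_j]
    have hmi_le : ∀ y ∈ pvMI e wd, y ≤ (istar : Int) := by
      intro y hy
      rw [pvMI] at hy
      obtain ⟨w, hwmem, rfl⟩ := List.mem_map.mp hy
      by_cases hin : PySem.Chars.isIn w.toList e = true
      · rw [if_pos hin]
        obtain ⟨r, hrle, heq, hp, _⟩ := pv_rfind_spec e _ ((pv_isIn_iff e _).mp hin)
        rw [heq]
        exact_mod_cast hmatch_le r hrle w hwmem hp
      · rw [if_neg hin]
        have : (0:Int) ≤ (istar : Int) := by positivity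
        omega
    have hmem : (istar : Int) ∈ pvMI e wd := by
      rw [← hmi_j]
      exact pv_getD_mem _ jstar 0 (by rw [pvMI_length]; exact hjlt)
    obtain ⟨m, hmax?⟩ : ∃ m, PySem.List.max? (pvMI e wd) (fun x => x) = some m := by
      cases h : PySem.List.max? (pvMI e wd) (fun x => x) with
      | none =>
          rw [PySem.List.max?_eq_none_iff] at h
          have := pvMI_length e wd
          rw [h] at this
          cases wd with
          | nil => exact absurd rfl hne
          | cons a b => simp at this
      | some m => exact ⟨m, rfl⟩
    have hm_eq : m = (istar : Int) :=
      le_antisymm (hmi_le m (PySem.List.max?_mem hmax?)) (PySem.List.max?_isMax hmax? _ hmem)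
    have hidx : PySem.List.index? (pvMI e wd) ((istar : Nat) : Int) = some jstar := by
      apply pv_index?_eq _ _ _ (by rw [pvMI_length]; exact hjlt) hmi_j
      intro j' hj'
      rw [pvMI_getD e wd j' (by omega)]
      by_cases hin : PySem.Chars.isIn (wd.getD j' "").toList e = true
      · rw [if_pos hin]
        intro hceq
        obtain ⟨r, hrle, heq, hp, hmaxr⟩ := pv_rfind_spec e _ ((pv_isIn_iff e _).mp hin)
        rw [heq] at hceq
        have : r = istar := by exact_mod_cast hceq
        rw [this] at hp
        exact hminj j' hj' hp
      · rw [if_neg hin]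
        intro hceq
        omega
    have hA : translate_from_right elem wd sd
        = String.ofList (e.take istar ++ ((sd.getD jstar "").toList
            ++ e.drop (istar + (wd.getD jstar "").toList.length))) := by
      unfold translate_from_right
      simp only [pv_foldl_mi, List.nil_append, ← he]
      rw [hmax?]
      simp only [Option.getD_some]
      rw [hm_eq, hidx]
      simp only [Option.getD_some]
      rw [PySem.List.slice_to_natCast, PySem.List.slice_from_natCast]
      unfold pvReplace1
      simp only [pv_find_of_prefix _ _ hpre_j]
      norm_num
    rw [hA, hB]
    simp [List.append_assoc]
  · push_neg at hm
    set e := elem.toList with he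
    have hB : translate_from_right_alt elem wd sd = elem := by
      unfold translate_from_right_alt
      rw [← he,
        (pvScan_eq_none_iff e wd e.length).mpr
          (fun i hi => (pvRow_eq_none_iff e i wd).mpr (hm i hi))]
    have hmi : pvMI e wd = wd.map (fun _ => (-1 : Int)) := by
      rw [pvMI]
      apply List.map_congr_left
      intro w hwmem
      rw [if_neg]
      intro hin
      obtain ⟨i, hi, hp⟩ := (pv_isIn_iff e _).mp hin
      exact hm i hi w hwmem hp
    obtain ⟨w0, wrest, rfl⟩ : ∃ w0 wrest, wd = w0 :: wrest := by
      cases wd with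
      | nil => exact absurd rfl hne
      | cons a b => exact ⟨a, b, rfl⟩
    have hmax? : PySem.List.max? (pvMI e (w0 :: wrest)) (fun x => x) = some (-1) := by
      cases h : PySem.List.max? (pvMI e (w0 :: wrest)) (fun x => x) with
      | none =>
          rw [PySem.List.max?_eq_none_iff, hmi] at h
          simp at h
      | some m =>
          have := PySem.List.max?_mem h
          rw [hmi] at this
          obtain ⟨w, _, rfl⟩ := List.mem_map.mp this
          rfl
    have hidx : PySem.List.index? (pvMI e (w0 :: wrest)) (-1) = some 0 := by
      rw [hmi]
      simp only [List.map_cons]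
      exact PySem.List.index?_cons_self _ _
    have hfind : PySem.Chars.find (e.drop (e.length - 1)) w0.toList = -1 := by
      rw [PySem.Chars.find_eq_neg_one_iff]
      intro hinf
      obtain ⟨i, hp⟩ := (pv_infix_iff _ _).mp hinf
      rw [List.drop_drop] at hp
      obtain ⟨i', hi', hp'⟩ := (pv_exists_bound e w0.toList).mp ⟨_, hp⟩
      exact hm i' hi' w0 (by simp) hp'
    have hA : translate_from_right elem (w0 :: wrest) sd = elem := by
      unfold translate_from_right
      simp only [pv_foldl_mi, List.nil_append, ← he]
      rw [hmax?]
      simp only [Option.getD_some]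
      rw [hidx]
      simp only [Option.getD_some]
      rw [PySem.List.slice_to_neg_one, PySem.List.slice_from_neg_one]
      unfold pvReplace1
      simp only [List.getD_cons_zero]
      rw [hfind]
      simp only [ite_true, if_pos]
      rw [List.dropLast_eq_take, List.take_append_drop]
      simp [he]
    rw [hA, hB]
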